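-- pv_equiv track=rewrite | github.com/aangush/enzyme_engine | src/analysis/neighborhood_analyzer.py | cluster_hypotheticals
-- ===== SOURCE A (Python) =====
-- def sequence_identity(seq1, seq2):
--     """Calculates basic sequence identity to group similar hypothetical proteins."""
--     if not seq1 or not seq2: return 0
--     shorter = min(len(seq1), len(seq2))
--     matches = sum(1 for i in range(shorter) if seq1[i] == seq2[i])
--     return (matches / max(len(seq1), len(seq2))) * 100
--
-- def cluster_hypotheticals(hypo_data, threshold=90):
--     """Groups protein IDs that share >90% sequence identity."""
--     clusters = {}
--     cluster_count = 0
--     ids = list(hypo_data.keys())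
--
--     for i in range(len(ids)):
--         if ids[i] in clusters: continue
--
--         cluster_count += 1
--         current_cluster_id = f"HypoCluster_{cluster_count:02}"
--         clusters[ids[i]] = current_cluster_id
--
--         for j in range(i + 1, len(ids)):
--             if ids[j] in clusters: continue
--             identity = sequence_identity(hypo_data[ids[i]], hypo_data[ids[j]])
--             if identity >= threshold:
--                 clusters[ids[j]] = current_cluster_id
--
--     return clusters
-- ===== SOURCE B (Python) =====
-- def sequence_identity(seq1, seq2):
--     """Calculates basic sequence identity to group similar hypothetical proteins."""
--     if not seq1 or not seq2: return 0
--     shorter = min(len(seq1), len(seq2))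
--     matches = sum(1 for i in range(shorter) if seq1[i] == seq2[i])
--     return (matches / max(len(seq1), len(seq2))) * 100
--
-- def cluster_hypotheticals(hypo_data, threshold=90):
--     """Single pass over the ids keeping a registry of cluster seeds with their
--     member lists; the id->label dict is emitted group by group at the end."""
--     groups = []  # entries: [seed_sequence, label, member_ids]
--     count = 0
--     for pid, seq in hypo_data.items():
--         placed = False
--         for g in groups:
--             if sequence_identity(g[0], seq) >= threshold:
--                 g[2].append(pid)
--                 placed = True
--                 break
--         if not placed:
--             count += 1
--             groups.append([seq, f"HypoCluster_{count:02}", [pid]])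
--     return {pid: label for _, label, members in groups for pid in members}
-- ===== Notes on version B (the rewrite author's own statement) =====
-- stated objective: alternative
-- what changed: A marks clusters by a nested index-pair loop over a shared id->label dict (each new seed scans all later ids and skips already-labelled ones); B makes a single pass over the ids maintaining a registry of cluster seeds with member lists, assigning each id to the first matching seed or opening a new group, and emits the id->label dict group by group at the end.
import Mathlib
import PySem

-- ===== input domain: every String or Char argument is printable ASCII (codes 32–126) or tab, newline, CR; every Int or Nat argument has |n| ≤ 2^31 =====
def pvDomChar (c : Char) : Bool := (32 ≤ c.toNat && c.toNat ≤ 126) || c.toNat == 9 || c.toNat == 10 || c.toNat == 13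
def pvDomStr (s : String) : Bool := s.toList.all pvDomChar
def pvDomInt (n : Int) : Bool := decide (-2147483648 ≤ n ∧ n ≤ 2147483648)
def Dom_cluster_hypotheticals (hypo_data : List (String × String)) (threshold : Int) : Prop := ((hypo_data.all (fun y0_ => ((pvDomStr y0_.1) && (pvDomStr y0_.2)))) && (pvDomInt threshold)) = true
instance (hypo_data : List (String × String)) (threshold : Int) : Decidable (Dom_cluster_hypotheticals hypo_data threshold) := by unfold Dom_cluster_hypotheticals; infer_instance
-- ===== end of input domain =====

-- B replaces A's nested index-pair loops over a shared id->label dict by a single pass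
-- keeping a registry of cluster seeds with member lists (alternative decomposition, same cost).


-- ===== PORT A =====
-- Shared helper sequence_identity(s1,s2) >= t, the only way both Pythons consume the float
-- sequence_identity returns. Python computes ((m/M) * 100) >= t in IEEE-754 doubles; pvRound
-- rounds a positive rational p/q to the nearest double (round-half-even, 53-bit significand,
-- no overflow/underflow in the reachable range 1/M ≤ v ≤ 101) as (n, e) with value n·2^(e-52),
-- so the two roundings and the final int-vs-float comparison below are exact integer arithmetic.
def pvRound (p q : Nat) : Nat × Int :=
  let g : Int := (PySem.Int.bitLength (p : Int) : Int) - (PySem.Int.bitLength (q : Int) : Int)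
  let ge : Bool := if 0 ≤ g then decide (q * 2 ^ g.toNat ≤ p) else decide (q ≤ p * 2 ^ (-g).toNat)
  let e : Int := if ge then g else g - 1
  let a : Nat := if e ≤ 52 then (52 - e).toNat else 0
  let b : Nat := if 52 < e then (e - 52).toNat else 0
  let pa := p * 2 ^ a
  let qb := q * 2 ^ b
  let d := pa / qb
  let r := pa % qb
  (d + (if qb < 2 * r ∨ (2 * r = qb ∧ d % 2 = 1) then 1 else 0), e)

-- ((m/M) * 100) >= t for 0 ≤ m ≤ M, 1 ≤ M (exact model of the two double roundings)
def pvIdentityGe (m M : Nat) (t : Int) : Bool :=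
  if m = 0 then decide (t ≤ 0) else
  let r1 := pvRound m M
  let pq : Nat × Nat :=
    if 52 ≤ r1.2 then (r1.1 * 100 * 2 ^ (r1.2 - 52).toNat, 1) else (r1.1 * 100, 2 ^ (52 - r1.2).toNat)
  let r2 := pvRound pq.1 pq.2
  if 52 ≤ r2.2 then decide (t ≤ (r2.1 : Int) * 2 ^ (r2.2 - 52).toNat)
  else decide (t * 2 ^ (52 - r2.2).toNat ≤ (r2.1 : Int))

-- matches = sum(1 for i in range(shorter) if seq1[i] == seq2[i])
def pvMatchCount : List Char → List Char → Nat
  | a :: as, b :: bs => (if a = b then 1 else 0) + pvMatchCount as bs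
  | _, _ => 0

-- sequence_identity(s1, s2) >= t  (int 0 when a sequence is empty, else the float above)
def pvSeqIdentityGe (s1 s2 : String) (t : Int) : Bool :=
  if s1.toList = [] ∨ s2.toList = [] then decide (t ≤ 0)
  else pvIdentityGe (pvMatchCount s1.toList s2.toList) (max s1.toList.length s2.toList.length) t

-- f"HypoCluster_{c:02}" for c ≥ 1
def pvLabel (c : Int) : String :=
  let ds := PySem.Int.toChars c
  String.ofList ("HypoCluster_".toList ++ (if ds.length < 2 then '0' :: ds else ds))

-- inner loop: for j in range(i+1, len(ids)) over the suffix js after ids[i]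
-- (hd.getD j "" is Python's hypo_data[ids[j]]: j is always a key, so the default is dead)
def clusterAInner (hd : PySem.Dict String String) (th : Int) (seedSeq lbl : String)
    (d : PySem.Dict String String) : List String → PySem.Dict String String
  | [] => d
  | j :: js =>
    if d.contains j then clusterAInner hd th seedSeq lbl d js
    else if pvSeqIdentityGe seedSeq (hd.getD j "") th then
      clusterAInner hd th seedSeq lbl (d.insert j lbl) js
    else clusterAInner hd th seedSeq lbl d js

-- outer loop: for i in range(len(ids)) over the suffix of ids
def clusterAOuter (hd : PySem.Dict String String) (th : Int)
    (d : PySem.Dict String String) (cnt : Int) : List String → PySem.Dict String String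
  | [] => d
  | x :: js =>
    if d.contains x then clusterAOuter hd th d cnt js
    else
      let cnt' := cnt + 1
      let lbl := pvLabel cnt'
      let d1 := d.insert x lbl
      let d2 := clusterAInner hd th (hd.getD x "") lbl d1 js
      clusterAOuter hd th d2 cnt' js

def cluster_hypotheticals (hypo_data : List (String × String)) (threshold : Int) : List (String × String) :=
  let hd := PySem.Dict.ofList hypo_data
  (clusterAOuter hd threshold PySem.Dict.empty 0 hd.keys).items

-- ===== PORT B =====
-- scan the registry for the first seed with identity >= threshold; append pid to its members
def placeB (th : Int) (sq pid : String) :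
    List (String × String × List String) → Option (List (String × String × List String))
  | [] => none
  | (s, l, ms) :: gs =>
    if pvSeqIdentityGe s sq th then some ((s, l, ms ++ [pid]) :: gs)
    else (placeB th sq pid gs).map (fun gs' => (s, l, ms) :: gs')

-- one id: place it, or open a new group (count is the running cluster counter)
def stepB (th : Int) (st : List (String × String × List String) × Int) (p : String × String) :
    List (String × String × List String) × Int :=
  match placeB th p.2 p.1 st.1 with
  | some gs' => (gs', st.2)
  | none => (st.1 ++ [(p.2, pvLabel (st.2 + 1), [p.1])], st.2 + 1)

def cluster_hypotheticals_alt (hypo_data : List (String × String)) (threshold : Int) : List (String × String) :=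
  let hd := PySem.Dict.ofList hypo_data
  let fin := hd.items.foldl (stepB threshold) ([], 0)
  fin.1.flatMap (fun g => g.2.2.map (fun pid => (pid, g.2.1)))

-- ===== PRECONDITION & SPEC =====
def Spec_cluster_hypotheticals (hypo_data : List (String × String)) (threshold : Int) (out : List (String × String)) : Prop := out = cluster_hypotheticals_alt hypo_data threshold
instance (hypo_data : List (String × String)) (threshold : Int) (out : List (String × String)) : Decidable (Spec_cluster_hypotheticals hypo_data threshold out) := by unfold Spec_cluster_hypotheticals; infer_instance

-- ===== CLAIM (what is proved, stated in full; the proofs are below) =====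
def Claim_equal_cluster_hypotheticals : Prop := ∀ (hypo_data : List (String × String)) (threshold : Int), Dom_cluster_hypotheticals hypo_data threshold → Spec_cluster_hypotheticals hypo_data threshold (cluster_hypotheticals hypo_data threshold)

-- ===== LEMMAS AND PROOFS =====

-- the common "peel one seed" spec: the first id becomes a seed with label cnt+1 and absorbs
-- every later matching id; the remaining ids are clustered recursively among themselves
def specG (th cnt : Int) : List (String × String) → List (String × String × List String)
  | [] => []
  | p :: js =>
    (p.2, pvLabel (cnt + 1), p.1 :: (js.filter (fun q => pvSeqIdentityGe p.2 q.2 th)).map (·.1))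
      :: specG th (cnt + 1) (js.filter (fun q => ! pvSeqIdentityGe p.2 q.2 th))
  termination_by l => l.length
  decreasing_by simpa using Nat.lt_succ_of_le (by simpa using List.length_filter_le _ js.attach)

-- the same spec flattened to id->label pairs, over the keys (A's view of the data)
def specA (hd : PySem.Dict String String) (th cnt : Int) : List String → List (String × String)
  | [] => []
  | x :: js =>
    (x, pvLabel (cnt + 1))
      :: (js.filter (fun j => pvSeqIdentityGe (hd.getD x "") (hd.getD j "") th)).map
          (fun j => (j, pvLabel (cnt + 1)))
      ++ specA hd th (cnt + 1)
          (js.filter (fun j => ! pvSeqIdentityGe (hd.getD x "") (hd.getD j "") th))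
  termination_by l => l.length
  decreasing_by simpa using Nat.lt_succ_of_le (by simpa using List.length_filter_le _ js.attach)

def noneMatchB (th : Int) (gs : List (String × String × List String)) (q : String × String) : Bool :=
  gs.all (fun g => ! pvSeqIdentityGe g.1 q.2 th)

-- how a fixed registry absorbs a stream of ids: each seed takes the matching ids it sees first
def absorbB (th : Int) :
    List (String × String × List String) → List (String × String) → List (String × String × List String)
  | [], _ => []
  | (s, l, ms) :: gs, L =>
    (s, l, ms ++ (L.filter (fun q => pvSeqIdentityGe s q.2 th)).map (·.1))
      :: absorbB th gs (L.filter (fun q => ! pvSeqIdentityGe s q.2 th))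

theorem absorbB_nil (th : Int) (gs : List (String × String × List String)) :
    absorbB th gs [] = gs := by
  induction gs with
  | nil => rfl
  | cons g gs ih => obtain ⟨s, l, ms⟩ := g; simp [absorbB, ih]

theorem noneMatchB_nil_eq (th : Int) : noneMatchB th [] = fun _ => true := by
  funext q; simp [noneMatchB]

theorem noneMatchB_cons_eq (th : Int) (s l : String) (ms : List String)
    (gs : List (String × String × List String)) :
    noneMatchB th ((s, l, ms) :: gs)
      = fun q => noneMatchB th gs q && ! pvSeqIdentityGe s q.2 th := by
  funext q; simp [noneMatchB, Bool.and_comm]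

theorem noneMatchB_append_eq (th : Int) (as bs : List (String × String × List String)) :
    noneMatchB th (as ++ bs) = fun q => noneMatchB th as q && noneMatchB th bs q := by
  funext q; simp [noneMatchB]

theorem noneMatchB_cons (th : Int) (s l : String) (ms : List String)
    (gs : List (String × String × List String)) (q : String × String) :
    noneMatchB th ((s, l, ms) :: gs) q
      = (noneMatchB th gs q && ! pvSeqIdentityGe s q.2 th) := by
  simp [noneMatchB, Bool.and_comm]

theorem placeB_none_iff (th : Int) (sq pid : String) (gs : List (String × String × List String)) :
    placeB th sq pid gs = none ↔ noneMatchB th gs (pid, sq) = true := by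
  induction gs with
  | nil => simp [placeB, noneMatchB]
  | cons g gs ih =>
    obtain ⟨s, l, ms⟩ := g
    by_cases h : pvSeqIdentityGe s sq th
    · simp [placeB, noneMatchB, h]
    · simp [placeB, noneMatchB, h]
      simpa [noneMatchB] using ih

theorem placeB_seeds (th : Int) (sq pid : String)
    (gs gs' : List (String × String × List String))
    (h : placeB th sq pid gs = some gs') :
    gs'.map (fun g => g.1) = gs.map (fun g => g.1) := by
  induction gs generalizing gs' with
  | nil => simp [placeB] at h
  | cons g gs ih =>
    obtain ⟨s, l, ms⟩ := g
    by_cases hg : pvSeqIdentityGe s sq th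
    · simp [placeB, hg] at h; subst h; simp
    · simp [placeB, hg] at h
      obtain ⟨gs0, h0, rfl⟩ := h
      simp [ih gs0 h0]

theorem noneMatchB_of_seeds (th : Int) (gs gs' : List (String × String × List String))
    (h : gs'.map (fun g => g.1) = gs.map (fun g => g.1)) (q : String × String) :
    noneMatchB th gs' q = noneMatchB th gs q := by
  unfold noneMatchB
  rw [show (fun g : String × String × List String => ! pvSeqIdentityGe g.1 q.2 th)
      = ((fun s => ! pvSeqIdentityGe s q.2 th) ∘ (fun g => g.1)) from rfl]
  rw [← List.all_map, ← List.all_map, h]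

theorem placeB_absorb (th : Int) (sq pid : String)
    (gs gs' : List (String × String × List String))
    (h : placeB th sq pid gs = some gs') :
    ∀ L, absorbB th gs' L = absorbB th gs ((pid, sq) :: L) := by
  induction gs generalizing gs' with
  | nil => simp [placeB] at h
  | cons g gs ih =>
    obtain ⟨s, l, ms⟩ := g
    intro L
    by_cases hg : pvSeqIdentityGe s sq th
    · simp [placeB, hg] at h; subst h
      simp [absorbB, hg]
    · simp [placeB, hg] at h
      obtain ⟨gs0, h0, rfl⟩ := h
      simp [absorbB, hg, ih gs0 h0 (L.filter (fun q => ! pvSeqIdentityGe s q.2 th))]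

theorem absorbB_skip (th : Int) (gs : List (String × String × List String))
    (p : String × String) (h : noneMatchB th gs p = true) :
    ∀ L, absorbB th gs (p :: L) = absorbB th gs L := by
  induction gs with
  | nil => intro L; rfl
  | cons g gs ih =>
    obtain ⟨s, l, ms⟩ := g
    intro L
    rw [noneMatchB_cons] at h
    have h' := h
    rw [Bool.and_eq_true] at h'
    have hge : pvSeqIdentityGe s p.2 th = false := by simpa using h'.2
    simp [absorbB, hge, ih h'.1]

theorem absorbB_append (th : Int) (as bs : List (String × String × List String)) :
    ∀ L, absorbB th (as ++ bs) L
      = absorbB th as L ++ absorbB th bs (L.filter (noneMatchB th as)) := by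
  induction as with
  | nil =>
    intro L
    simp [absorbB, noneMatchB_nil_eq]
  | cons g as ih =>
    obtain ⟨s, l, ms⟩ := g
    intro L
    simp only [List.cons_append, absorbB, ih, noneMatchB_cons_eq, List.filter_filter]

theorem foldB (th : Int) :
    ∀ (L : List (String × String)) (gs : List (String × String × List String)) (n : Int),
    (L.foldl (stepB th) (gs, n)).1
      = absorbB th gs L ++ specG th n (L.filter (noneMatchB th gs)) := by
  intro L
  induction L with
  | nil => intro gs n; simp [absorbB_nil, specG]
  | cons p L ih =>
    intro gs n
    simp only [List.foldl_cons]
    cases h : placeB th p.2 p.1 gs with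
    | none =>
      have hnm : noneMatchB th gs p = true := by
        have := (placeB_none_iff th p.2 p.1 gs).1 h
        simpa using this
      simp only [stepB, h]
      rw [ih]
      rw [absorbB_append]
      have habs1 : absorbB th [(p.2, pvLabel (n + 1), [p.1])] (L.filter (noneMatchB th gs))
          = [(p.2, pvLabel (n + 1),
              p.1 :: ((L.filter (noneMatchB th gs)).filter
                (fun q => pvSeqIdentityGe p.2 q.2 th)).map (·.1))] := by
        simp [absorbB]
      have hfil : L.filter (noneMatchB th (gs ++ [(p.2, pvLabel (n + 1), [p.1])]))
          = (L.filter (noneMatchB th gs)).filter (fun q => ! pvSeqIdentityGe p.2 q.2 th) := by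
        rw [List.filter_filter]
        apply List.filter_congr
        intro q _
        rw [noneMatchB_append_eq]
        simp [noneMatchB, Bool.and_comm]
      rw [hfil, habs1, absorbB_skip th gs p hnm]
      have hcons : (p :: L).filter (noneMatchB th gs) = p :: L.filter (noneMatchB th gs) := by
        simp [hnm]
      rw [hcons]
      simp only [specG]
      simp [List.append_assoc]
    | some gs' =>
      simp only [stepB, h]
      rw [ih, placeB_absorb th p.2 p.1 gs gs' h L]
      have hnm : noneMatchB th gs p = false := by
        cases hb : noneMatchB th gs p
        · rfl
        · have : placeB th p.2 p.1 gs = none :=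
            (placeB_none_iff th p.2 p.1 gs).2 (by simpa using hb)
          rw [h] at this; exact absurd this (Option.some_ne_none _)
      have hcons : (p :: L).filter (noneMatchB th gs) = L.filter (noneMatchB th gs) := by
        simp [hnm]
      rw [hcons]
      congr 2
      apply List.filter_congr
      intro q _
      exact noneMatchB_of_seeds th gs gs' (placeB_seeds th p.2 p.1 gs gs' h) q

theorem specG_bridge (hd : PySem.Dict String String) (th : Int) :
    ∀ (N : Nat) (ks : List String) (cnt : Int), ks.length ≤ N →
    (specG th cnt (ks.map (fun k => (k, hd.getD k "")))).flatMap
        (fun g => g.2.2.map (fun pid => (pid, g.2.1)))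
      = specA hd th cnt ks := by
  intro N
  induction N with
  | zero =>
    intro ks cnt h
    have : ks = [] := List.eq_nil_of_length_eq_zero (Nat.le_zero.1 h)
    subst this; simp [specG, specA]
  | succ N ih =>
    intro ks cnt h
    cases ks with
    | nil => simp [specG, specA]
    | cons x js =>
      simp only [List.map_cons, specG, specA]
      rw [List.filter_map, List.filter_map]
      have hcomp1 : ((fun q : String × String => pvSeqIdentityGe (hd.getD x "") q.2 th)
            ∘ fun k => (k, hd.getD k ""))
          = fun j => pvSeqIdentityGe (hd.getD x "") (hd.getD j "") th := by
        funext j; simp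
      have hcomp2 : ((fun q : String × String => ! pvSeqIdentityGe (hd.getD x "") q.2 th)
            ∘ fun k => (k, hd.getD k ""))
          = fun j => ! pvSeqIdentityGe (hd.getD x "") (hd.getD j "") th := by
        funext j; simp
      rw [hcomp1, hcomp2]
      have hlen : (js.filter (fun j =>
          ! pvSeqIdentityGe (hd.getD x "") (hd.getD j "") th)).length ≤ N :=
        le_trans (List.length_filter_le _ _) (by simpa using Nat.le_of_succ_le_succ h)
      simp only [List.flatMap_cons]
      rw [ih _ _ hlen]
      simp [Function.comp, List.map_map]

-- ===== A side =====

theorem innerItems (hd : PySem.Dict String String) (th : Int) (s lbl : String) :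
    ∀ (js : List String) (d : PySem.Dict String String), js.Nodup →
    (clusterAInner hd th s lbl d js).items
      = d.items ++ (js.filter
          (fun j => ! d.contains j && pvSeqIdentityGe s (hd.getD j "") th)).map
            (fun j => (j, lbl)) := by
  intro js
  induction js with
  | nil => intro d _; simp [clusterAInner]
  | cons j js ih =>
    intro d hnd
    have hj : j ∉ js := (List.nodup_cons.1 hnd).1
    have hnd' : js.Nodup := (List.nodup_cons.1 hnd).2
    by_cases hc : d.contains j
    · simp [clusterAInner, hc, ih d hnd']
    · have hcf : d.contains j = false := by simpa using hc
      by_cases hg : pvSeqIdentityGe s (hd.getD j "") th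
      · simp only [clusterAInner, hcf, hg, Bool.false_eq_true, if_false, if_true]
        rw [ih (d.insert j lbl) hnd']
        rw [PySem.Dict.items_insert_of_not_contains d lbl hcf]
        have heq : js.filter (fun j' => ! (d.insert j lbl).contains j'
              && pvSeqIdentityGe s (hd.getD j' "") th)
            = js.filter (fun j' => ! d.contains j'
              && pvSeqIdentityGe s (hd.getD j' "") th) := by
          apply List.filter_congr
          intro j' hj'
          have hne : (j' == j) = false := by
            simp; exact fun e => hj (e ▸ hj')
          rw [PySem.Dict.contains_insert, hne, Bool.false_or]
        rw [heq]
        simp [hcf, hg, List.append_assoc]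
      · simp [clusterAInner, hcf, hg, ih d hnd']

theorem innerContains (hd : PySem.Dict String String) (th : Int) (s lbl : String)
    (js : List String) (d : PySem.Dict String String) (hnd : js.Nodup) (y : String)
    (hy : y ∈ js) :
    (clusterAInner hd th s lbl d js).contains y
      = (d.contains y || pvSeqIdentityGe s (hd.getD y "") th) := by
  have hkeys : (clusterAInner hd th s lbl d js).keys
      = d.keys ++ js.filter
          (fun j => ! d.contains j && pvSeqIdentityGe s (hd.getD j "") th) := by
    have h2 := congrArg (List.map (fun p : String × String => p.1)) (innerItems hd th s lbl js d hnd)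
    simpa [PySem.Dict.keys, List.map_map, Function.comp_def] using h2
  rw [PySem.Dict.contains_eq_decide_mem_keys, hkeys,
      PySem.Dict.contains_eq_decide_mem_keys]
  by_cases hc : y ∈ d.keys
  · have hct : decide (y ∈ d.keys) = true := by simpa using hc
    simp [hc]
  · have hcf : decide (y ∈ d.keys) = false := by simpa using hc
    have hdc : d.contains y = false := by
      rw [PySem.Dict.contains_eq_decide_mem_keys]; exact hcf
    by_cases hg : pvSeqIdentityGe s (hd.getD y "") th <;>
      simp [hc, hg, hy, List.mem_filter, hdc]

theorem outerItems (hd : PySem.Dict String String) (th : Int) :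
    ∀ (rest : List String) (d : PySem.Dict String String) (cnt : Int), rest.Nodup →
    (clusterAOuter hd th d cnt rest).items
      = d.items ++ specA hd th cnt (rest.filter (fun r => ! d.contains r)) := by
  intro rest
  induction rest with
  | nil => intro d cnt _; simp [clusterAOuter, specA]
  | cons x js ih =>
    intro d cnt hnd
    have hx : x ∉ js := (List.nodup_cons.1 hnd).1
    have hnd' : js.Nodup := (List.nodup_cons.1 hnd).2
    by_cases hc : d.contains x
    · simp [clusterAOuter, hc, ih d cnt hnd']
    · have hcf : d.contains x = false := by simpa using hc
      simp only [clusterAOuter, hcf, Bool.false_eq_true, if_false]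
      set lbl := pvLabel (cnt + 1) with hlbl
      set d1 := d.insert x lbl with hd1
      set d2 := clusterAInner hd th (hd.getD x "") lbl d1 js with hd2
      have hd1c : ∀ j ∈ js, d1.contains j = d.contains j := by
        intro j hj
        rw [hd1, PySem.Dict.contains_insert]
        have hne : (j == x) = false := by
          simp; exact fun e => hx (e ▸ hj)
        rw [hne, Bool.false_or]
      have hd2items : d2.items = d.items ++ (x, lbl)
          :: (js.filter (fun j => ! d.contains j
              && pvSeqIdentityGe (hd.getD x "") (hd.getD j "") th)).map (fun j => (j, lbl)) := by
        rw [hd2, innerItems hd th _ lbl js d1 hnd']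
        have heq : js.filter (fun j => ! d1.contains j
              && pvSeqIdentityGe (hd.getD x "") (hd.getD j "") th)
            = js.filter (fun j => ! d.contains j
              && pvSeqIdentityGe (hd.getD x "") (hd.getD j "") th) := by
          apply List.filter_congr
          intro j hj
          rw [hd1c j hj]
        rw [heq, hd1, PySem.Dict.items_insert_of_not_contains d lbl hcf]
        simp [List.append_assoc]
      have hd2cont : ∀ j ∈ js, (! d2.contains j)
          = (! d.contains j && ! pvSeqIdentityGe (hd.getD x "") (hd.getD j "") th) := by
        intro j hj
        rw [hd2, innerContains hd th _ lbl js d1 hnd' j hj, hd1c j hj]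
        cases d.contains j <;> cases pvSeqIdentityGe (hd.getD x "") (hd.getD j "") th <;> simp
      rw [ih d2 (cnt + 1) hnd', hd2items]
      have hfil2 : js.filter (fun r => ! d2.contains r)
          = (js.filter (fun r => ! d.contains r)).filter
              (fun j => ! pvSeqIdentityGe (hd.getD x "") (hd.getD j "") th) := by
        rw [List.filter_filter]
        apply List.filter_congr
        intro j hj
        rw [hd2cont j hj]
        cases d.contains j <;> cases pvSeqIdentityGe (hd.getD x "") (hd.getD j "") th <;> simp
      have hfil1 : js.filter (fun j => ! d.contains j
            && pvSeqIdentityGe (hd.getD x "") (hd.getD j "") th)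
          = (js.filter (fun r => ! d.contains r)).filter
              (fun j => pvSeqIdentityGe (hd.getD x "") (hd.getD j "") th) := by
        rw [List.filter_filter]
        apply List.filter_congr
        intro j hj
        cases d.contains j <;> cases pvSeqIdentityGe (hd.getD x "") (hd.getD j "") th <;> simp
      rw [hfil2, hfil1]
      have hcons : (x :: js).filter (fun r => ! d.contains r)
          = x :: js.filter (fun r => ! d.contains r) := by simp [hcf]
      rw [hcons]
      simp only [specA]
      simp [hlbl, List.append_assoc]

-- ===== VERDICT (by name: the statement is the Claim_ definition above) =====
theorem cluster_hypotheticals_spec : Claim_equal_cluster_hypotheticals := by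
  intro hypo_data threshold _
  simp only [Spec_cluster_hypotheticals, cluster_hypotheticals, cluster_hypotheticals_alt]
  set hd := PySem.Dict.ofList hypo_data with hhd
  have hnd : hd.keys.Nodup := PySem.Dict.nodup_keys_ofList hypo_data
  rw [outerItems hd threshold hd.keys PySem.Dict.empty 0 hnd]
  rw [foldB threshold hd.items [] 0]
  have h1 : hd.keys.filter (fun r => ! (PySem.Dict.empty : PySem.Dict String String).contains r)
      = hd.keys := by
    simp [PySem.Dict.contains_empty]
  have h2 : hd.items.filter (noneMatchB threshold []) = hd.items := by
    rw [noneMatchB_nil_eq, List.filter_true]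
  have h3 : absorbB threshold [] hd.items = [] := rfl
  have h4 : hd.items = hd.keys.map (fun k => (k, hd.getD k "")) :=
    PySem.Dict.items_eq_map_keys hd hnd ""
  have h5 : (PySem.Dict.empty : PySem.Dict String String).items = [] := rfl
  rw [h1, h2, h3, h5, List.nil_append, List.nil_append, h4,
      specG_bridge hd threshold hd.keys.length hd.keys 0 (le_refl _)]
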